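-- pv_equiv track=rewrite | github.com/oovaa/mypython | mostprofitAssigingWork.py | mostProfit
-- ===== SOURCE A (Python) =====
-- def mostProfit(difficulty: list[int], profit: list[int], workers: list[int]) -> int:
--     # Combine difficulty and profit into tuples and sort them by difficulty
--     jobs = sorted(zip(difficulty, profit), key=lambda x: x[0])
--
--     maxprof = 0
--     current_max_profit = 0
--     j = 0
--
--     for i in sorted(workers):
--         while j < len(jobs) and i >= jobs[j][0]:
--             current_max_profit = max(current_max_profit, jobs[j][1])
--             j += 1
--         maxprof += current_max_profit
--
--     return maxprof
-- ===== SOURCE B (Python) =====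
-- def mostProfit(difficulty: list[int], profit: list[int], workers: list[int]) -> int:
--     # For each worker independently, take the best profit among jobs he can do (0 if none).
--     jobs = list(zip(difficulty, profit))
--     return sum(max([0] + [p for d, p in jobs if d <= w]) for w in workers)
-- ===== Notes on version B (the rewrite author's own statement) =====
-- stated objective: simpler
-- what changed: Replaced the sort-both-lists two-pointer sweep with a running max by a direct per-worker formula: for each worker take max(0, profits of jobs with difficulty <= worker) over the unsorted job list and sum; no sorting, no shared loop state.
import Mathlib
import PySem

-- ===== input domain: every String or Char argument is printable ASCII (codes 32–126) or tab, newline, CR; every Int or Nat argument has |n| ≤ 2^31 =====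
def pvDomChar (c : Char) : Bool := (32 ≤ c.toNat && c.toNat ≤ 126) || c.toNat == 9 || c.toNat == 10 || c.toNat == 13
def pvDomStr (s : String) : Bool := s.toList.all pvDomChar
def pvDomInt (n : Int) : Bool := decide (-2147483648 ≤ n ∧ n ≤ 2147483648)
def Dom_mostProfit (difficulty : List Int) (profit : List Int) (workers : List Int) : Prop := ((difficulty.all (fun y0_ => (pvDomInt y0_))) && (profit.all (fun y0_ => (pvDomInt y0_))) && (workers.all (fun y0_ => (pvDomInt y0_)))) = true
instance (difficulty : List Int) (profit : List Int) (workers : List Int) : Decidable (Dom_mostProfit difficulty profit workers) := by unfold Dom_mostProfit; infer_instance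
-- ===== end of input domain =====

-- B replaces the sort-both + two-pointer sweep by a direct per-worker max over the unsorted jobs (simpler; not faster).

-- ===== PORT A =====
-- the 'while j < len(jobs) and i >= jobs[j][0]' loop, on the remaining suffix of jobs
def pvAdvA (i cur : Int) : List (Int × Int) → Int × List (Int × Int)
  | [] => (cur, [])
  | (d0, p0) :: tl => if i ≥ d0 then pvAdvA i (max cur p0) tl else (cur, (d0, p0) :: tl)

-- the 'for i in sorted(workers)' loop, state (maxprof, current_max_profit, remaining jobs)
def pvLoopA (acc cur : Int) (rest : List (Int × Int)) : List Int → Int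
  | [] => acc
  | i :: ws =>
    let s := pvAdvA i cur rest
    pvLoopA (acc + s.1) s.1 s.2 ws

def mostProfit (difficulty : List Int) (profit : List Int) (workers : List Int) : Int :=
  let jobs := PySem.List.sorted (difficulty.zip profit) (fun x => x.1) false
  pvLoopA 0 0 jobs (PySem.List.sorted workers (fun x => x) false)

-- ===== PORT B =====
def mostProfit_alt (difficulty : List Int) (profit : List Int) (workers : List Int) : Int :=
  let jobs := difficulty.zip profit
  (workers.map (fun w =>
    ((jobs.filter (fun j => decide (j.1 ≤ w))).map (fun j => j.2)).foldl max 0)).sum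

-- ===== PRECONDITION & SPEC =====
def Spec_mostProfit (difficulty : List Int) (profit : List Int) (workers : List Int) (out : Int) : Prop := out = mostProfit_alt difficulty profit workers
instance (difficulty : List Int) (profit : List Int) (workers : List Int) (out : Int) : Decidable (Spec_mostProfit difficulty profit workers out) := by unfold Spec_mostProfit; infer_instance

-- ===== CLAIM (what is proved, stated in full; the proofs are below) =====
def Claim_equal_mostProfit : Prop := ∀ (difficulty : List Int) (profit : List Int) (workers : List Int), Dom_mostProfit difficulty profit workers → Spec_mostProfit difficulty profit workers (mostProfit difficulty profit workers)

-- ===== LEMMAS AND PROOFS =====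

-- contribution of one worker w: running max (seed cur) over eligible jobs of rest
def pvF (rest : List (Int × Int)) (cur w : Int) : Int :=
  (rest.filter (fun j => decide (j.1 ≤ w))).foldl (fun a j => max a j.2) cur

theorem pvAdvA_eq (i cur : Int) (rest : List (Int × Int)) :
    pvAdvA i cur rest =
      ((rest.takeWhile (fun j => decide (j.1 ≤ i))).foldl (fun a j => max a j.2) cur,
       rest.dropWhile (fun j => decide (j.1 ≤ i))) := by
  induction rest generalizing cur with
  | nil => simp [pvAdvA]
  | cons hd tl ih =>
    obtain ⟨d0, p0⟩ := hd
    by_cases h : d0 ≤ i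
    · simp [pvAdvA, ge_iff_le, h, ih]
    · simp [pvAdvA, ge_iff_le, h, ]

theorem pvTakeWhile_eq_filter (i : Int) (l : List (Int × Int))
    (hs : l.Pairwise (fun a b => a.1 ≤ b.1)) :
    l.takeWhile (fun j => decide (j.1 ≤ i)) = l.filter (fun j => decide (j.1 ≤ i)) := by
  induction l with
  | nil => rfl
  | cons hd tl ih =>
    rcases List.pairwise_cons.mp hs with ⟨hhd, htl⟩
    by_cases h : hd.1 ≤ i
    · simp [ h, ih htl]
    · have : tl.filter (fun j => decide (j.1 ≤ i)) = [] := by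
        apply List.filter_eq_nil_iff.mpr
        intro x hx
        simp only [decide_eq_true_eq]
        intro hxle
        exact h (le_trans (hhd x hx) hxle)
      simp [ h, this]

theorem pvF_step (i w cur : Int) (rest : List (Int × Int)) (hiw : i ≤ w) :
    pvF rest cur w =
      pvF (rest.dropWhile (fun j => decide (j.1 ≤ i)))
        ((rest.takeWhile (fun j => decide (j.1 ≤ i))).foldl (fun a j => max a j.2) cur) w := by
  unfold pvF
  conv_lhs => rw [← List.takeWhile_append_dropWhile (p := fun j => decide (j.1 ≤ i)) (l := rest)]
  rw [List.filter_append, List.foldl_append]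
  have hall : ∀ x ∈ rest.takeWhile (fun j => decide (j.1 ≤ i)), (fun j : Int × Int => decide (j.1 ≤ w)) x = true := by
    intro x hx
    have := List.mem_takeWhile_imp hx
    simp only [decide_eq_true_eq] at this ⊢
    exact le_trans this hiw
  rw [List.filter_eq_self.mpr hall]

theorem pvLoopA_eq (ws : List Int) : ∀ (rest : List (Int × Int)) (cur acc : Int),
    ws.Pairwise (· ≤ ·) → rest.Pairwise (fun a b => a.1 ≤ b.1) →
    pvLoopA acc cur rest ws = acc + (ws.map (fun w => pvF rest cur w)).sum := by
  induction ws with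
  | nil => intro rest cur acc _ _; simp [pvLoopA]
  | cons i ws ih =>
    intro rest cur acc hws hrest
    rcases List.pairwise_cons.mp hws with ⟨hi, hws'⟩
    have hdrop : (rest.dropWhile (fun j => decide (j.1 ≤ i))).Pairwise (fun a b => a.1 ≤ b.1) :=
      hrest.sublist (List.dropWhile_sublist _)
    simp only [pvLoopA, pvAdvA_eq]
    rw [ih _ _ _ hws' hdrop]
    have hmap : ws.map (fun w => pvF (rest.dropWhile (fun j => decide (j.1 ≤ i)))
        ((rest.takeWhile (fun j => decide (j.1 ≤ i))).foldl (fun a j => max a j.2) cur) w)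
        = ws.map (fun w => pvF rest cur w) := by
      apply List.map_congr_left
      intro w hw
      exact (pvF_step i w cur rest (hi w hw)).symm
    rw [hmap]
    have hcur : (rest.takeWhile (fun j => decide (j.1 ≤ i))).foldl (fun a j => max a j.2) cur
        = pvF rest cur i := by
      unfold pvF; rw [pvTakeWhile_eq_filter i rest hrest]
    rw [hcur]
    simp [List.map_cons]
    ring

theorem pvF_perm (cur w : Int) {l₁ l₂ : List (Int × Int)} (h : l₁.Perm l₂) :
    pvF l₁ cur w = pvF l₂ cur w := by
  unfold pvF
  haveI : RightCommutative (fun (a : Int) (j : Int × Int) => max a j.2) :=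
    ⟨fun b a₁ a₂ => max_right_comm b a₁.2 a₂.2⟩
  exact List.Perm.foldl_eq (h.filter _) cur

-- ===== VERDICT (by name: the statement is the Claim_ definition above) =====
theorem mostProfit_spec : Claim_equal_mostProfit := by
  intro difficulty profit workers _
  unfold Spec_mostProfit mostProfit mostProfit_alt
  simp only
  rw [pvLoopA_eq _ _ _ _ (by
        have := PySem.List.sorted_pairwise workers (fun x => x) ;
        simpa using this)
      (PySem.List.sorted_pairwise (difficulty.zip profit) (fun x => x.1))]
  have hperm : (PySem.List.sorted workers (fun x => x) false).Perm workers :=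
    PySem.List.sorted_perm workers (fun x => x) false
  have hjobs : (PySem.List.sorted (difficulty.zip profit) (fun x => x.1) false).Perm (difficulty.zip profit) :=
    PySem.List.sorted_perm (difficulty.zip profit) (fun x => x.1) false
  have hmap : ∀ w : Int,
      pvF (PySem.List.sorted (difficulty.zip profit) (fun x => x.1) false) 0 w
        = ((((difficulty.zip profit).filter (fun j => decide (j.1 ≤ w))).map (fun j => j.2)).foldl max 0) := by
    intro w
    rw [pvF_perm 0 w hjobs]
    unfold pvF
    rw [List.foldl_map]
  calc (0 : Int) + ((PySem.List.sorted workers (fun x => x) false).map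
        (fun w => pvF (PySem.List.sorted (difficulty.zip profit) (fun x => x.1) false) 0 w)).sum
      = ((PySem.List.sorted workers (fun x => x) false).map
        (fun w => (((difficulty.zip profit).filter (fun j => decide (j.1 ≤ w))).map (fun j => j.2)).foldl max 0)).sum := by
        simp only [zero_add]; congr 1; exact List.map_congr_left (fun w _ => hmap w)
    _ = (workers.map
        (fun w => (((difficulty.zip profit).filter (fun j => decide (j.1 ≤ w))).map (fun j => j.2)).foldl max 0)).sum :=
        (hperm.map _).sum_eq
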